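-- pv_equiv track=rewrite | github.com/sloppynacho/Py4GW | Sources/modular_bot/tools/script_helper.py | _enum_key_from_name
-- ===== SOURCE A (Python) =====
-- def _enum_key_from_name(name: str, default_prefix: str) -> str:
--     cleaned = []
--     previous_was_underscore = False
--     for ch in (name or "").upper():
--         if ch.isalnum():
--             cleaned.append(ch)
--             previous_was_underscore = False
--             continue
--         if not previous_was_underscore:
--             cleaned.append("_")
--             previous_was_underscore = True
--     key = "".join(cleaned).strip("_")
--     return key or default_prefix
-- ===== SOURCE B (Python) =====
-- from itertools import groupby
--
-- def _enum_key_from_name(name: str, default_prefix: str) -> str: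
--     tokens = [''.join(g) for k, g in groupby((name or "").upper(), str.isalnum) if k]
--     return '_'.join(tokens) or default_prefix
-- ===== Notes on version B (the rewrite author's own statement) =====
-- stated objective: idiomatic
-- what changed: Replaces the char-by-char accumulator with a previous-was-underscore flag plus a final strip('_') by grouping the uppercased string into alphanumeric runs (itertools.groupby) and joining the runs with '_'.
import Mathlib
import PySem

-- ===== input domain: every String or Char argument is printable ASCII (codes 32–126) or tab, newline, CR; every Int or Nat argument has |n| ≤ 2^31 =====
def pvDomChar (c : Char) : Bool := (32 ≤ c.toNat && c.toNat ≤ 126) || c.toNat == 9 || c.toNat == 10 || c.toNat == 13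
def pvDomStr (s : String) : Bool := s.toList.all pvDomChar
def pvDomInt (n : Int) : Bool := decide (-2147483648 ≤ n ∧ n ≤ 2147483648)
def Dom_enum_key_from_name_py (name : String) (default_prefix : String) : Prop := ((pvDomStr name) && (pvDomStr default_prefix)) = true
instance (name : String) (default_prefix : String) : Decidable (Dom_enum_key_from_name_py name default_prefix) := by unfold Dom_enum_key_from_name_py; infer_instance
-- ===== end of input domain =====

-- B replaces A's char-by-char accumulator with a previous-was-underscore flag (plus a final
-- strip('_')) by grouping the uppercased string into alphanumeric runs and joining them with '_'.

-- ===== PORT A =====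
-- the loop: for ch in (name or "").upper(): …  (cleaned built front-to-back, flag = previous_was_underscore)
def pvBuildA : List Char → Bool → List Char
  | [], _ => []
  | c :: cs, p =>
    if PySem.Chars.isalnum c then c :: pvBuildA cs false
    else if p then pvBuildA cs p
    else '_' :: pvBuildA cs true

def enum_key_from_name_py (name : String) (default_prefix : String) : String :=
  let base := if name = "" then "" else name        -- (name or "")
  let cleaned := pvBuildA (PySem.Chars.upper base.toList) false
  let key := PySem.Chars.stripChars cleaned ['_']   -- "".join(cleaned).strip("_")
  if key = [] then default_prefix else String.mk key   -- key or default_prefix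

-- ===== PORT B =====
-- itertools.groupby((name or "").upper(), str.isalnum), kept groups only: the alphanumeric runs
def pvToks : List Char → List (List Char)
  | [] => []
  | c :: cs =>
    if PySem.Chars.isalnum c then
      (c :: cs.takeWhile PySem.Chars.isalnum) :: pvToks (cs.dropWhile PySem.Chars.isalnum)
    else pvToks cs
termination_by cs => cs.length
decreasing_by
  · simpa using Nat.lt_succ_of_le (List.length_dropWhile_le _ _)
  · simp

def enum_key_from_name_py_alt (name : String) (default_prefix : String) : String :=
  let base := if name = "" then "" else name        -- (name or "")
  let key := PySem.Chars.join ['_'] (pvToks (PySem.Chars.upper base.toList))   -- '_'.join(tokens)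
  if key = [] then default_prefix else String.mk key   -- … or default_prefix

-- ===== PRECONDITION & SPEC =====
def Spec_enum_key_from_name_py (name : String) (default_prefix : String) (out : String) : Prop := out = enum_key_from_name_py_alt name default_prefix
instance (name : String) (default_prefix : String) (out : String) : Decidable (Spec_enum_key_from_name_py name default_prefix out) := by unfold Spec_enum_key_from_name_py; infer_instance

-- ===== CLAIM (what is proved, stated in full; the proofs are below) =====
def Claim_equal_enum_key_from_name_py : Prop := ∀ (name : String) (default_prefix : String), Dom_enum_key_from_name_py name default_prefix → Spec_enum_key_from_name_py name default_prefix (enum_key_from_name_py name default_prefix)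

-- ===== LEMMAS AND PROOFS =====

-- trailing-run flag: the last character exists and is not alphanumeric
def pvTrail (cs : List Char) : Bool :=
  match cs.getLast? with
  | some c => ! PySem.Chars.isalnum c
  | none => false

theorem pvTrail_cons_cons (c d : Char) (cs : List Char) :
    pvTrail (c :: d :: cs) = pvTrail (d :: cs) := by
  simp [pvTrail, List.getLast?_cons_cons]

theorem pvIc_cons2 (t u : List Char) (R : List (List Char)) :
    List.intercalate ['_'] (t :: u :: R) = t ++ '_' :: List.intercalate ['_'] (u :: R) := by
  simp [List.intercalate]

theorem pvIc_head (a : Char) (u : List Char) (R : List (List Char)) :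
    List.intercalate ['_'] ((a :: u) :: R) = a :: List.intercalate ['_'] (u :: R) := by
  cases R with
  | nil => simp [List.intercalate]
  | cons v R => rw [pvIc_cons2, pvIc_cons2]; simp

theorem pvToks_nil_all (cs : List Char) (h : pvToks cs = []) :
    ∀ x ∈ cs, PySem.Chars.isalnum x = false := by
  induction cs with
  | nil => simp
  | cons c cs ih =>
    intro x hx
    by_cases hc : PySem.Chars.isalnum c
    · rw [pvToks, if_pos hc] at h; simp at h
    · rcases List.mem_cons.mp hx with hx | hx
      · simpa [hx] using hc
      · exact ih (by rwa [pvToks, if_neg hc] at h) x hx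

theorem pvToks_props (cs : List Char) :
    ∀ t ∈ pvToks cs, t ≠ [] ∧ ∀ x ∈ t, PySem.Chars.isalnum x = true := by
  induction cs using pvToks.induct with
  | case1 => simp [pvToks]
  | case2 c cs hc ih =>
    intro t ht
    rw [pvToks, if_pos hc] at ht
    rcases List.mem_cons.mp ht with ht | ht
    · subst ht
      refine ⟨by simp, ?_⟩
      intro x hx
      rcases List.mem_cons.mp hx with hx | hx
      · simpa [hx] using hc
      · exact List.mem_takeWhile_imp hx
    · exact ih t ht
  | case3 c cs hc ih =>
    intro t ht
    rw [pvToks, if_neg hc] at ht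
    exact ih t ht

-- the leading underscore A emits when the string starts with a non-alphanumeric character
def pvLead (cs : List Char) : List Char :=
  match cs with
  | [] => []
  | c :: _ => if PySem.Chars.isalnum c then [] else ['_']

theorem pvBuildA_false (cs : List Char) :
    pvBuildA cs false = pvLead cs ++ pvBuildA cs true := by
  cases cs with
  | nil => rfl
  | cons c cs =>
    by_cases hc : PySem.Chars.isalnum c <;> simp [pvLead, pvBuildA, hc]

theorem pvBuildA_true (cs : List Char) :
    pvBuildA cs true =
      List.intercalate ['_'] (pvToks cs) ++
        (if pvToks cs ≠ [] ∧ pvTrail cs = true then ['_'] else []) := by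
  induction cs with
  | nil => simp [pvBuildA, pvToks, List.intercalate]
  | cons c cs ih =>
    by_cases hc : PySem.Chars.isalnum c
    · have h1 : pvBuildA (c :: cs) true = c :: pvBuildA cs false := by
        rw [pvBuildA, if_pos hc]
      rw [h1, pvBuildA_false]
      cases cs with
      | nil =>
        rw [pvToks, if_pos hc]
        simp [pvLead, pvToks, pvBuildA, pvTrail, hc, List.intercalate]
      | cons d cs' =>
        rw [ih, pvTrail_cons_cons]
        by_cases hd : PySem.Chars.isalnum d
        · have h2 : pvToks (c :: d :: cs') =
              (c :: d :: cs'.takeWhile PySem.Chars.isalnum) ::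
                pvToks (cs'.dropWhile PySem.Chars.isalnum) := by
            rw [pvToks, if_pos hc]
            simp [List.takeWhile_cons, List.dropWhile_cons, hd]
          have h3 : pvToks (d :: cs') =
              (d :: cs'.takeWhile PySem.Chars.isalnum) ::
                pvToks (cs'.dropWhile PySem.Chars.isalnum) := by
            rw [pvToks, if_pos hd]
          rw [h2, h3]
          simp [pvLead, hd, pvIc_head]
        · have h2 : pvToks (c :: d :: cs') = [c] :: pvToks (d :: cs') := by
            rw [pvToks, if_pos hc]
            simp [List.takeWhile_cons, List.dropWhile_cons, hd]
          rw [h2]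
          cases htk : pvToks (d :: cs') with
          | nil =>
            have hall := pvToks_nil_all _ htk
            have hlast : pvTrail (d :: cs') = true := by
              have hmem : (d :: cs').getLast (by simp) ∈ d :: cs' := List.getLast_mem _
              have hx : PySem.Chars.isalnum ((d :: cs').getLast (by simp)) = false :=
                hall _ hmem
              simp [pvTrail, List.getLast?_eq_getLast, hx]
            simp [pvLead, htk, hlast, hd, List.intercalate]
          | cons t R =>
            rw [pvIc_cons2]
            by_cases htl : pvTrail (d :: cs') = true <;> simp [pvLead, htk, htl, hd]
    · have h1 : pvBuildA (c :: cs) true = pvBuildA cs true := by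
        rw [pvBuildA, if_neg hc]
        simp
      have h2 : pvToks (c :: cs) = pvToks cs := by rw [pvToks, if_neg hc]
      rw [h1, h2, ih]
      cases cs with
      | nil => simp [pvToks, pvTrail]
      | cons d cs' => rw [pvTrail_cons_cons]

-- '_' is not alphanumeric, so no character of a token is '_'
theorem pvAlnum_ne_und {c : Char} (h : PySem.Chars.isalnum c = true) : (c == '_') = false := by
  cases hcu : c == '_'
  · rfl
  · have : c = '_' := beq_iff_eq.mp hcu
    subst this
    exact absurd h (by decide)

theorem pvIntercalate_last {t : List Char} {ts : List (List Char)}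
    (hp : ∀ u ∈ t :: ts, u ≠ [] ∧ ∀ x ∈ u, PySem.Chars.isalnum x = true) :
    ∃ c m, List.intercalate ['_'] (t :: ts) = m ++ [c] ∧ PySem.Chars.isalnum c = true := by
  induction ts generalizing t with
  | nil =>
    obtain ⟨hne, hall⟩ := hp t (by simp)
    rcases (List.eq_nil_or_concat t).resolve_left hne with ⟨m, c, hmc⟩
    exact ⟨c, m, by simp [List.intercalate, hmc], hall c (by simp [hmc])⟩
  | cons u us ih =>
    obtain ⟨c, m, hmc, hcal⟩ := ih (t := u) (fun v hv => hp v (by simp at hv ⊢; tauto))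
    refine ⟨c, t ++ '_' :: m, ?_, hcal⟩
    rw [pvIc_cons2, hmc]
    simp

theorem pvContains_und (x : Char) : (['_'] : List Char).contains x = (x == '_') := by
  cases hx : x == '_'
  · have hne : x ≠ '_' := by simpa using hx
    simp [List.contains_cons, hne]
  · have heq : x = '_' := beq_iff_eq.mp hx
    simp [List.contains_cons, heq]

theorem pvStrip_und : PySem.Chars.stripChars ['_'] ['_'] = [] := by decide

-- stripping '_' from (lead ++ M ++ trail) with lead/trail ∈ {[], ['_']} and M delimited by
-- non-underscore characters gives back M
theorem pvStrip_core (lead trail M : List Char)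
    (hl : lead = [] ∨ lead = ['_']) (ht : trail = [] ∨ trail = ['_'])
    (hhd : ∃ h tl, M = h :: tl ∧ (h == '_') = false)
    (hlast : ∃ c m, M = m ++ [c] ∧ (c == '_') = false) :
    PySem.Chars.stripChars (lead ++ (M ++ trail)) ['_'] = M := by
  obtain ⟨h, tl, hM1, hh⟩ := hhd
  obtain ⟨c, m, hM2, hc⟩ := hlast
  have step1 : (lead ++ (M ++ trail)).dropWhile (fun x => List.contains ['_'] x) = M ++ trail := by
    have hne : h ≠ '_' := by simpa using hh
    have hM : (M ++ trail).dropWhile (fun x => List.contains ['_'] x) = M ++ trail := by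
      rw [hM1]
      simp [List.dropWhile_cons, hne]
    rcases hl with hl | hl <;> subst hl
    · simpa using hM
    · simpa [List.dropWhile_cons, pvContains_und] using hM
  have step2 : ((M ++ trail).reverse).dropWhile (fun x => List.contains ['_'] x) = M.reverse := by
    have hne : c ≠ '_' := by simpa using hc
    have hM : (M.reverse).dropWhile (fun x => List.contains ['_'] x) = M.reverse := by
      rw [hM2]
      simp [List.dropWhile_cons, hne]
    rcases ht with ht | ht <;> subst ht
    · simpa using hM
    · simpa [List.reverse_append, List.dropWhile_cons, pvContains_und] using hM
  simp only [PySem.Chars.stripChars]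
  rw [step1, step2, List.reverse_reverse]

theorem pvStrip_main (cs : List Char) :
    PySem.Chars.stripChars (pvBuildA cs false) ['_'] = List.intercalate ['_'] (pvToks cs) := by
  rw [pvBuildA_false, pvBuildA_true]
  cases htk : pvToks cs with
  | nil =>
    cases cs with
    | nil => decide
    | cons c cs' =>
      have hc : PySem.Chars.isalnum c = false := pvToks_nil_all _ htk c (by simp)
      simp [pvLead, hc, List.intercalate, pvStrip_und]
  | cons t ts =>
    have hp := pvToks_props cs
    rw [htk] at hp
    obtain ⟨hne, hall⟩ := hp t (by simp)
    obtain ⟨hd, t', ht'⟩ := List.exists_cons_of_ne_nil hne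
    obtain ⟨clast, m, hmc, hclast⟩ := pvIntercalate_last hp
    have hhd : ∃ h tl, List.intercalate ['_'] (t :: ts) = h :: tl ∧ (h == '_') = false := by
      subst ht'
      rw [pvIc_head]
      exact ⟨hd, _, rfl, pvAlnum_ne_und (hall hd (by simp))⟩
    rw [← List.append_assoc] at *
    have := pvStrip_core (pvLead cs)
      (if t :: ts ≠ [] ∧ pvTrail cs = true then ['_'] else [])
      (List.intercalate ['_'] (t :: ts))
      (by cases cs with
          | nil => exact Or.inl rfl
          | cons c cs' => by_cases hx : PySem.Chars.isalnum c <;> simp [pvLead, hx])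
      (by by_cases hx : t :: ts ≠ [] ∧ pvTrail cs = true <;> simp [hx])
      hhd
      ⟨clast, m, hmc, pvAlnum_ne_und hclast⟩
    rw [← List.append_assoc] at this
    exact this

theorem pvKey_eq (name : String) :
    PySem.Chars.stripChars
        (pvBuildA (PySem.Chars.upper (if name = "" then "" else name).toList) false) ['_'] =
      PySem.Chars.join ['_']
        (pvToks (PySem.Chars.upper (if name = "" then "" else name).toList)) := by
  rw [PySem.Chars.join]
  exact pvStrip_main _

-- ===== VERDICT (by name: the statement is the Claim_ definition above) =====
theorem enum_key_from_name_py_spec : Claim_equal_enum_key_from_name_py := by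
  intro name default_prefix _
  unfold Spec_enum_key_from_name_py enum_key_from_name_py enum_key_from_name_py_alt
  simp only
  rw [pvKey_eq]
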